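-- pv_equiv track=rewrite | github.com/AndrasNyiri/AdventOfCode | day11/day11.py | shorten_all_steps
-- ===== SOURCE A (Python) =====
-- def shorten_all_steps(steps):
--     for j in range(len(steps)):
--             for k in range(len(steps)):
--                 step1 = steps[j]
--                 step2 = steps[k]
--                 short = shorten_two_steps(step1,step2)
--                 if short != None:
--                     if short == "del":
--                         steps.pop(k)
--                         steps.pop(j)
--                     else:
--                         steps[j] = short
--                         steps.pop(k)
--                     return True
--     return False
--
-- def shorten_two_steps(step1, step2):
--     if step1 == "ne":
--         if step2 == "s":
--             return "se"
--         elif step2 == "nw":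
--             return "n"
--         elif step2 == "sw":
--             return "del"
--
--     elif step1 == "se":
--         if step2 == "n":
--             return "ne"
--         elif step2 == "sw":
--             return "s"
--         elif step2 == "nw":
--             return "del"
--
--     elif step1 == "s":
--         if step2 == "ne":
--             return "se"
--         elif step2 == "nw":
--             return "sw"
--         elif step2 == "n":
--             return "del"
--
--
--     elif step1 == "sw":
--         if step2 == "se":
--             return "s"
--         elif step2 == "n":
--             return "nw"
--         elif step2 == "ne":
--             return "del"
--
--     elif step1 == "nw":
--         if step2 == "s":
--             return "sw"
--         elif step2 == "ne":
--             return "n"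
--         elif step2 == "se":
--             return "del"
--
--     elif step1 == "n":
--         if step2 == "se":
--             return "ne"
--         elif step2 == "sw":
--             return "nw"
--         elif step2 == "s":
--             return "del"
--
--     return None
-- ===== SOURCE B (Python) =====
-- # Return-value equivalent of A (A also mutates `steps` in place on success; B does not mutate).
-- # O(n): check presence of each of the 6 directions once, then test the fixed 18 reducible ordered pairs.
-- DIRS = ["n", "ne", "se", "s", "sw", "nw"]
--
-- def shorten_all_steps(steps):
--     present = [d in steps for d in DIRS]
--     return any(present[i] and present[(i + d) % 6]
--                for i in range(6) for d in (2, 3, 4))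
-- ===== Notes on version B (the rewrite author's own statement) =====
-- stated objective: faster
-- what changed: Replaces the nested scan over all index pairs by one presence flag per direction (six membership tests) checked against the fixed table of reducible direction pairs; B does not mutate the input list (equivalence is about the return value).
import Mathlib
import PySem

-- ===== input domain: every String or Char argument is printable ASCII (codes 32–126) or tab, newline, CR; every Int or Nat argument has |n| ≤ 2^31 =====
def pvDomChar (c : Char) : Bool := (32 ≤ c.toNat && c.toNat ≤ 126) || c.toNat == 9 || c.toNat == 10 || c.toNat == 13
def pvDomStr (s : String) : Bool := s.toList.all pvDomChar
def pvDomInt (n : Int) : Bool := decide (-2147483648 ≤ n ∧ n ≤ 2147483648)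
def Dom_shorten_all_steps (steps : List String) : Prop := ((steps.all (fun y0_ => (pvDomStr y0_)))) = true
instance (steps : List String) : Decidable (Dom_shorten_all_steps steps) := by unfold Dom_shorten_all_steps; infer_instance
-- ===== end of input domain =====

-- B replaces A's O(n^2) scan over index pairs by six membership tests and a fixed table of
-- reducible direction pairs (O(n)); equivalence is about the RETURN VALUE only — A also
-- mutates `steps` in place when it returns True, B does not.

-- ===== PORT A =====
def shortenTwo (step1 step2 : String) : Option String :=
  if step1 = "ne" then
    if step2 = "s" then some "se"
    else if step2 = "nw" then some "n"
    else if step2 = "sw" then some "del"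
    else none
  else if step1 = "se" then
    if step2 = "n" then some "ne"
    else if step2 = "sw" then some "s"
    else if step2 = "nw" then some "del"
    else none
  else if step1 = "s" then
    if step2 = "ne" then some "se"
    else if step2 = "nw" then some "sw"
    else if step2 = "n" then some "del"
    else none
  else if step1 = "sw" then
    if step2 = "se" then some "s"
    else if step2 = "n" then some "nw"
    else if step2 = "ne" then some "del"
    else none
  else if step1 = "nw" then
    if step2 = "s" then some "sw"
    else if step2 = "ne" then some "n"
    else if step2 = "se" then some "del"
    else none
  else if step1 = "n" then
    if step2 = "se" then some "ne"
    else if step2 = "sw" then some "nw"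
    else if step2 = "s" then some "del"
    else none
  else none

-- Python A pops/overwrites entries only in the iteration in which it returns True, so the
-- returned value is exactly this nested scan with early exit; the mutation is not ported.
def shorten_all_steps (steps : List String) : Bool :=
  (PySem.List.pyRange 0 (steps.length : Int) 1).any fun j =>
    (PySem.List.pyRange 0 (steps.length : Int) 1).any fun k =>
      match PySem.List.pyGet? steps j, PySem.List.pyGet? steps k with
      | some step1, some step2 => shortenTwo step1 step2 ≠ none
      | _, _ => false

-- ===== PORT B =====
def pvDirsB : List String := ["n", "ne", "se", "s", "sw", "nw"]

def shorten_all_steps_alt (steps : List String) : Bool :=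
  let present := pvDirsB.map (fun d => steps.contains d)
  (PySem.List.pyRange 0 6 1).any fun i =>
    ([2, 3, 4] : List Int).any fun d =>
      match PySem.List.pyGet? present i,
            PySem.List.pyGet? present (PySem.Int.mod (i + d) 6) with
      | some a, some b => a && b
      | none, _ => false
      | some _, none => false

-- ===== PRECONDITION & SPEC =====
def Spec_shorten_all_steps (steps : List String) (out : Bool) : Prop := out = shorten_all_steps_alt steps
instance (steps : List String) (out : Bool) : Decidable (Spec_shorten_all_steps steps out) := by unfold Spec_shorten_all_steps; infer_instance

-- ===== CLAIM (what is proved, stated in full; the proofs are below) =====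
def Claim_equal_shorten_all_steps : Prop := ∀ (steps : List String), Dom_shorten_all_steps steps → Spec_shorten_all_steps steps (shorten_all_steps steps)

-- ===== LEMMAS AND PROOFS =====

/-- The 18 ordered pairs on which `shortenTwo` returns a value. -/
def pvPairs : List (String × String) :=
  [("ne","s"),("ne","nw"),("ne","sw"),
   ("se","n"),("se","sw"),("se","nw"),
   ("s","ne"),("s","nw"),("s","n"),
   ("sw","se"),("sw","n"),("sw","ne"),
   ("nw","s"),("nw","ne"),("nw","se"),
   ("n","se"),("n","sw"),("n","s")]

lemma shortenTwo_ne_none_iff (s1 s2 : String) :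
    shortenTwo s1 s2 ≠ none ↔ (s1, s2) ∈ pvPairs := by
  unfold shortenTwo pvPairs
  split_ifs <;> simp_all [Prod.ext_iff]

lemma portA_iff (steps : List String) :
    shorten_all_steps steps = true ↔
      ∃ p ∈ pvPairs, p.1 ∈ steps ∧ p.2 ∈ steps := by
  unfold shorten_all_steps
  simp only [List.any_eq_true, PySem.List.mem_pyRange_one]
  constructor
  · rintro ⟨j, ⟨hj0, hjl⟩, k, ⟨hk0, hkl⟩, h⟩
    rcases hg1 : PySem.List.pyGet? steps j with _ | s1 <;> rw [hg1] at h
    · simp at h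
    rcases hg2 : PySem.List.pyGet? steps k with _ | s2 <;> rw [hg2] at h
    · simp at h
    simp only [decide_eq_true_eq] at h
    exact ⟨(s1, s2), (shortenTwo_ne_none_iff s1 s2).1 h,
      PySem.List.mem_of_pyGet?_eq_some _ hg1, PySem.List.mem_of_pyGet?_eq_some _ hg2⟩
  · rintro ⟨⟨s1, s2⟩, hp, h1, h2⟩
    obtain ⟨i1, hi1, hg1⟩ := List.getElem_of_mem h1
    obtain ⟨i2, hi2, hg2⟩ := List.getElem_of_mem h2
    refine ⟨(i1 : Int), ⟨by positivity, by exact_mod_cast hi1⟩,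
            (i2 : Int), ⟨by positivity, by exact_mod_cast hi2⟩, ?_⟩
    rw [PySem.List.pyGet?_natCast, PySem.List.pyGet?_natCast,
        List.getElem?_eq_getElem hi1, List.getElem?_eq_getElem hi2, hg1, hg2]
    simpa using (shortenTwo_ne_none_iff s1 s2).2 hp

lemma portB_eq (steps : List String) :
    shorten_all_steps_alt steps =
      pvPairs.any (fun p => steps.contains p.1 && steps.contains p.2) := by
  unfold shorten_all_steps_alt pvPairs pvDirsB
  have hr : PySem.List.pyRange 0 6 1 = [0, 1, 2, 3, 4, 5] := by decide
  rw [hr]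
  simp only [List.map, List.any_cons, List.any_nil]
  generalize steps.contains "n" = c0
  generalize steps.contains "ne" = c1
  generalize steps.contains "se" = c2
  generalize steps.contains "s" = c3
  generalize steps.contains "sw" = c4
  generalize steps.contains "nw" = c5
  revert c0 c1 c2 c3 c4 c5
  decide

-- ===== VERDICT (by name: the statement is the Claim_ definition above) =====
theorem shorten_all_steps_spec : Claim_equal_shorten_all_steps := by
  intro steps _
  unfold Spec_shorten_all_steps
  rw [portB_eq, Bool.eq_iff_iff, portA_iff, List.any_eq_true]
  constructor
  · rintro ⟨p, hp, h1, h2⟩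
    exact ⟨p, hp, by simp [h1, h2]⟩
  · rintro ⟨p, hp, h⟩
    simp only [Bool.and_eq_true, List.contains_eq_mem, decide_eq_true_eq] at h
    exact ⟨p, hp, h.1, h.2⟩
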